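-- pv_equiv track=rewrite | github.com/gbhong/Algorithm_for_Python | 201207_programmers_멀리뛰기.py | solution
-- ===== SOURCE A (Python) =====
-- import math
--
-- def combi(n,r):
--     f = math.factorial
--     return f(n) // f(r) // f(n-r)
--
-- def solution(n):
--     answer = 0
--     q = n // 2
--     if n%2 == 0:
--         for i in range(q, -1, -1):
--             answer += combi((2*q)-i, i)
--     else:
--         for i in range(q, -1, -1):
--             answer += combi((2*q+1)-i, i)
--
--     return answer%1234567
-- ===== SOURCE B (Python) =====
-- def solution(n):
--     a, b = 0, 1
--     for _ in range(n + 1):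
--         a, b = b, (a + b) % 1234567
--     return a
-- ===== Notes on version B (the rewrite author's own statement) =====
-- stated objective: faster
-- what changed: Replaces the binomial-coefficient sum (one bignum-factorial combi() per term) by a single-pass iterative Fibonacci recurrence with all arithmetic reduced mod 1234567.
import Mathlib
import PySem

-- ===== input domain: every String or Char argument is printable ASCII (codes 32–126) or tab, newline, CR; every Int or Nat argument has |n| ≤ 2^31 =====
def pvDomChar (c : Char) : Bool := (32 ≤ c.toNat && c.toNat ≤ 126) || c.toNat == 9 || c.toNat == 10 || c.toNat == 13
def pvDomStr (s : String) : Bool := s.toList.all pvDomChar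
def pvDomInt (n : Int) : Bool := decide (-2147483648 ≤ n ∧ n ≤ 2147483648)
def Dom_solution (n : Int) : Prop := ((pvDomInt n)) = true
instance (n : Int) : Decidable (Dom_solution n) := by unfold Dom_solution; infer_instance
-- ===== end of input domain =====

-- B replaces A's O(n^2)-term binomial/factorial sum by the linear Fibonacci recurrence mod 1234567 (same return value for every int n, including n < 0 where both loops are empty).

-- ===== PORT A =====
-- math.factorial; exact for 0 ≤ x, and A only ever calls it with nonnegative arguments
def pvFact (x : Int) : Int := ((Nat.factorial x.toNat : Nat) : Int)

def combi (n r : Int) : Int :=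
  PySem.Int.floordiv (PySem.Int.floordiv (pvFact n) (pvFact r)) (pvFact (n - r))

def solution (n : Int) : Int :=
  let q := PySem.Int.floordiv n 2
  let answer : Int :=
    if PySem.Int.mod n 2 = 0 then
      (PySem.List.pyRange q (-1) (-1)).foldl (fun answer i => answer + combi (2 * q - i) i) 0
    else
      (PySem.List.pyRange q (-1) (-1)).foldl (fun answer i => answer + combi (2 * q + 1 - i) i) 0
  PySem.Int.mod answer 1234567

-- ===== PORT B =====
def solution_alt (n : Int) : Int :=
  ((PySem.List.pyRange 0 (n + 1) 1).foldl
    (fun (st : Int × Int) _ => (st.2, PySem.Int.mod (st.1 + st.2) 1234567)) (0, 1)).1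

-- ===== PRECONDITION & SPEC =====
def Spec_solution (n : Int) (out : Int) : Prop := out = solution_alt n
instance (n : Int) (out : Int) : Decidable (Spec_solution n out) := by unfold Spec_solution; infer_instance

-- ===== CLAIM (what is proved, stated in full; the proofs are below) =====
def Claim_equal_solution : Prop := ∀ (n : Int), Dom_solution n → Spec_solution n (solution n)

-- ===== LEMMAS AND PROOFS =====

-- A's combi really is the binomial coefficient when r ≤ n
lemma combi_eq_choose (n r : Nat) (h : r ≤ n) :
    combi (n : Int) (r : Int) = (Nat.choose n r : Int) := by
  have h2 : ((n : Int) - (r : Int)) = ((n - r : Nat) : Int) := by omega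
  unfold combi pvFact
  rw [h2]
  simp only [Int.toNat_natCast]
  rw [PySem.Int.floordiv_natCast, PySem.Int.floordiv_natCast]
  congr 1
  rw [Nat.div_div_eq_div_mul, Nat.choose_eq_factorial_div_factorial h]

-- ∑_{j=0}^{⌊m/2⌋} C(m-j, j) = fib (m+1)
lemma sum_choose_eq_fib (m : Nat) :
    ∑ j ∈ Finset.range (m / 2 + 1), Nat.choose (m - j) j = Nat.fib (m + 1) := by
  rw [Nat.fib_succ_eq_sum_choose, Finset.Nat.sum_antidiagonal_eq_sum_range_succ_mk]
  have hfull : ∑ j ∈ Finset.range (m / 2 + 1), Nat.choose (m - j) j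
      = ∑ j ∈ Finset.range (m + 1), Nat.choose (m - j) j := by
    apply Finset.sum_subset
    · intro x hx
      simp only [Finset.mem_range] at *
      omega
    · intro j hj hns
      simp only [Finset.mem_range] at hj hns
      exact Nat.choose_eq_zero_of_lt (by omega)
  rw [hfull, ← Finset.sum_range_reflect (fun i => Nat.choose i (m - i)) (m + 1)]
  apply Finset.sum_congr rfl
  intro j hj
  simp only [Finset.mem_range] at hj
  congr 1
  omega

-- A's countdown loop evaluates to fib (m+1), for either parity written as combi (m - i) i
lemma sumA (m : Nat) :
    (PySem.List.pyRange ((m / 2 : Nat) : Int) (-1) (-1)).foldl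
      (fun answer i => answer + combi ((m : Int) - i) i) 0 = (Nat.fib (m + 1) : Int) := by
  rw [PySem.List.pyRange_neg_one, PySem.List.foldl_add]
  have htn : (((m / 2 : Nat) : Int) - (-1)).toNat = m / 2 + 1 := by omega
  rw [htn, List.map_map]
  have hmap : (List.range (m / 2 + 1)).map
      ((fun i => combi ((m : Int) - i) i) ∘ (fun k : Nat => ((m / 2 : Nat) : Int) - (k : Int)))
      = (List.range (m / 2 + 1)).map (fun k : Nat => (Nat.choose (m - (m / 2 - k)) (m / 2 - k) : Int)) := by
    apply List.map_congr_left
    intro k hk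
    simp only [List.mem_range] at hk
    have hk' : k ≤ m / 2 := by omega
    have hc : ((m / 2 : Nat) : Int) - (k : Int) = ((m / 2 - k : Nat) : Int) := by omega
    have hc2 : (m : Int) - ((m / 2 - k : Nat) : Int) = ((m - (m / 2 - k) : Nat) : Int) := by omega
    simp only [Function.comp_apply, hc, hc2]
    exact combi_eq_choose _ _ (by omega)
  rw [hmap]
  have hcast : ((List.range (m / 2 + 1)).map
      (fun k : Nat => (Nat.choose (m - (m / 2 - k)) (m / 2 - k) : Int))).sum
      = ((∑ k ∈ Finset.range (m / 2 + 1), Nat.choose (m - (m / 2 - k)) (m / 2 - k) : Nat) : Int) := by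
    rw [Nat.cast_sum]
    rfl
  rw [hcast]
  have hrefl : ∑ k ∈ Finset.range (m / 2 + 1), Nat.choose (m - (m / 2 - k)) (m / 2 - k)
      = ∑ j ∈ Finset.range (m / 2 + 1), Nat.choose (m - j) j := by
    rw [← Finset.sum_range_reflect (fun j => Nat.choose (m - j) j) (m / 2 + 1)]
    apply Finset.sum_congr rfl
    intro k hk
    simp only [Finset.mem_range] at hk
    congr 2
  rw [zero_add, hrefl, sum_choose_eq_fib]

-- B's loop invariant: starting from (fib k % M, fib (k+1) % M), the loop lands on (fib (k+len) % M, fib (k+len+1) % M)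
lemma fold_fib (l : List Int) : ∀ (k : Nat),
    (l.foldl (fun (st : Int × Int) _ => (st.2, PySem.Int.mod (st.1 + st.2) 1234567))
      (((Nat.fib k % 1234567 : Nat) : Int), ((Nat.fib (k + 1) % 1234567 : Nat) : Int)))
    = (((Nat.fib (k + l.length) % 1234567 : Nat) : Int),
       ((Nat.fib (k + l.length + 1) % 1234567 : Nat) : Int)) := by
  induction l with
  | nil => intro k; simp
  | cons x t ih =>
    intro k
    have hstep : PySem.Int.mod (((Nat.fib k % 1234567 : Nat) : Int) + ((Nat.fib (k + 1) % 1234567 : Nat) : Int)) 1234567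
        = ((Nat.fib (k + 2) % 1234567 : Nat) : Int) := by
      rw [PySem.Int.mod_eq_emod_of_pos (by norm_num)]
      have h1 : ((Nat.fib k % 1234567 : Nat) : Int) + ((Nat.fib (k + 1) % 1234567 : Nat) : Int)
          = ((Nat.fib k % 1234567 + Nat.fib (k + 1) % 1234567 : Nat) : Int) := by push_cast; ring
      rw [h1, show (1234567 : Int) = ((1234567 : Nat) : Int) from rfl, ← Int.natCast_emod]
      congr 1
      rw [← Nat.add_mod, Nat.fib_add_two]
    simp only [List.foldl_cons, hstep]
    have := ih (k + 1)
    simp only [show k + 1 + 1 = k + 2 from rfl] at this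
    rw [this]
    simp only [List.length_cons]
    have h1 : k + 1 + t.length = k + (t.length + 1) := by omega
    rw [h1]

-- the value of B's port for nonnegative input
lemma solution_alt_nonneg (m : Nat) :
    solution_alt ((m : Int)) = ((Nat.fib (m + 1) % 1234567 : Nat) : Int) := by
  unfold solution_alt
  have h01 : ((0 : Int), (1 : Int))
      = (((Nat.fib 0 % 1234567 : Nat) : Int), ((Nat.fib (0 + 1) % 1234567 : Nat) : Int)) := by
    norm_num
  rw [h01, fold_fib]
  have hlen : (PySem.List.pyRange 0 ((m : Int) + 1) 1).length = m + 1 := by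
    rw [PySem.List.length_pyRange_one]
    omega
  rw [hlen]
  simp

-- the value of A's port for nonnegative input
lemma solution_nonneg (m : Nat) :
    solution ((m : Int)) = ((Nat.fib (m + 1) % 1234567 : Nat) : Int) := by
  unfold solution
  have hq : PySem.Int.floordiv ((m : Int)) 2 = ((m / 2 : Nat) : Int) := by
    exact_mod_cast PySem.Int.floordiv_natCast m 2
  have hm2 : PySem.Int.mod ((m : Int)) 2 = ((m % 2 : Nat) : Int) := by
    exact_mod_cast PySem.Int.mod_natCast m 2
  simp only [hq, hm2]
  have hmodfin : ∀ s : Int, s = (Nat.fib (m + 1) : Int) →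
      PySem.Int.mod s 1234567 = ((Nat.fib (m + 1) % 1234567 : Nat) : Int) := by
    intro s hs
    rw [hs, PySem.Int.mod_eq_emod_of_pos (by norm_num),
        show (1234567 : Int) = ((1234567 : Nat) : Int) from rfl, ← Int.natCast_emod]
  by_cases hpar : m % 2 = 0
  · have hcond : ((m % 2 : Nat) : Int) = 0 := by exact_mod_cast hpar
    rw [if_pos hcond]
    apply hmodfin
    have h2q : (2 : Int) * ((m / 2 : Nat) : Int) = (m : Int) := by omega
    have hfun : (fun (answer : Int) i => answer + combi (2 * ((m / 2 : Nat) : Int) - i) i)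
        = (fun (answer : Int) i => answer + combi ((m : Int) - i) i) := by
      funext a i; rw [h2q]
    rw [hfun, sumA]
  · have hm1 : m % 2 = 1 := by omega
    have hcond : ((m % 2 : Nat) : Int) ≠ 0 := by
      rw [hm1]; norm_num
    rw [if_neg hcond]
    apply hmodfin
    have h2q : (2 : Int) * ((m / 2 : Nat) : Int) + 1 = (m : Int) := by omega
    clear hcond
    have hfun : (fun (answer : Int) i => answer + combi (2 * ((m / 2 : Nat) : Int) + 1 - i) i)
        = (fun (answer : Int) i => answer + combi ((m : Int) - i) i) := by
      funext a i; rw [← h2q]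
    rw [hfun, sumA]

-- ===== VERDICT (by name: the statement is the Claim_ definition above) =====
theorem solution_spec : Claim_equal_solution := by
  intro n _
  unfold Spec_solution
  by_cases hn : 0 ≤ n
  · obtain ⟨m, rfl⟩ := Int.eq_ofNat_of_zero_le hn
    rw [solution_nonneg, solution_alt_nonneg]
  · -- n < 0: both loops are empty
    have hn' : n < 0 := by omega
    have hq : PySem.Int.floordiv n 2 ≤ -1 := by
      have := (PySem.Int.floordiv_lt_iff_lt_mul (a := n) (b := 2) (q := 0) (by norm_num)).mpr (by omega)
      omega
    have hA : PySem.List.pyRange (PySem.Int.floordiv n 2) (-1) (-1) = [] :=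
      PySem.List.pyRange_neg_one_eq_nil hq
    have hB : PySem.List.pyRange 0 (n + 1) 1 = [] :=
      PySem.List.pyRange_one_eq_nil (by omega)
    simp only [solution, solution_alt, hA, hB, List.foldl_nil]
    split <;> decide
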